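-- pv_equiv track=rewrite | github.com/jennitirok/Google-Get-Ahead-EMEA | Week 4/car_plates_dictionary.py | find_shortest_word
-- ===== SOURCE A (Python) =====
-- def find_shortest_word(plate, vocabulary):
--     """Return the shortest word in the vocabulary with all the letters in a license plate."""
--
--     # Filter the 'plate' string, grabing only letters in lowercase (a-z)
--     word_list = []
--     plate = plate.lower()
--     for i in plate:
--         if (ord(i) in range(97, 123)):
--             word_list.append(i)
--
--     # Iterate through the list of vocabulary and compare the letters in the plate with each vocabulary
--     matching_vocabs = []
--     if vocabulary == []:
--         return ""
--
--     for vocab in vocabulary: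
--         vocab = vocab.lower()
--         matching_counter = 0
--         seen = []
--         for char in word_list:
--             if char in vocab:
--                 if char in seen and vocab.count(char) == word_list.count(char):
--                     matching_counter += 2
--                 else:
--                     matching_counter += 1
--                     seen.append(char)
--             else:
--                 matching_counter = 0
--                 break
--         matching_vocabs.append(tuple((matching_counter, vocab)))
--
--     # Grab the highest number of matched letters
--     max_counter = max([x[0] for x in matching_vocabs])
--
--     if max_counter == 0:
--         return ""
--
--     # Filter the vocabulary, grabing only the ones with the highest max_counter
--     final_list = []
--     for pair in matching_vocabs:
--         if (pair[0] == max_counter):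
--             final_list.append(pair[1])
--
--     # Return the shortest word matched with the letters in the 'plate' string
--     return min(final_list, key=len)
-- ===== SOURCE B (Python) =====
-- def find_shortest_word(plate, vocabulary):
--     """Return the shortest word in the vocabulary with all the letters in a license plate."""
--     letters = [c for c in plate.lower() if 'a' <= c <= 'z']
--     cnt = {}
--     for c in letters:
--         cnt[c] = cnt.get(c, 0) + 1
--     best_score, best = 0, None
--     for word in vocabulary:
--         lw = word.lower()
--         if all(c in lw for c in cnt):
--             score = len(letters) + sum(m - 1 for c, m in cnt.items()
--                                        if m > 1 and lw.count(c) == m)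
--         else:
--             score = 0
--         if score > best_score or (score == best_score and best is not None
--                                   and len(lw) < len(best)):
--             best_score, best = score, lw
--     return best if best is not None else ""
-- ===== Notes on version B (the rewrite author's own statement) =====
-- stated objective: faster
-- what changed: Replaces the per-word inner scan with its seen-list and break by a letter Counter built once from the plate: each word is scored in closed form (subset check plus a per-letter duplicate bonus), and a single running-best fold replaces A's intermediate pair list, max pass, filter pass and min pass.
import Mathlib
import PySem

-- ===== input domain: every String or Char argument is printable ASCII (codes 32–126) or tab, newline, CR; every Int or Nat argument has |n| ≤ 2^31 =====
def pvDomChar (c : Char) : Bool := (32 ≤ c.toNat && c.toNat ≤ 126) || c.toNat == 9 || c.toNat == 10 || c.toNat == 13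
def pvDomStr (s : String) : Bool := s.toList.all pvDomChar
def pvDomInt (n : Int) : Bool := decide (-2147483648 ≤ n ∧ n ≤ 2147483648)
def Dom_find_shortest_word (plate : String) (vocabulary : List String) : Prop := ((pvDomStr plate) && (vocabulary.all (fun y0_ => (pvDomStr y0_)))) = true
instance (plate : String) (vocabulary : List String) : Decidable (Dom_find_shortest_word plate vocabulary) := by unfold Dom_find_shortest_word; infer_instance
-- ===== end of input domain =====

-- B replaces A's per-word scan-with-seen-list (which repeatedly rescans word_list and seen) and
-- A's four passes (pair list, max, filter, min) by a plate-letter counter built once, a closed-form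
-- per-word score and one running-best fold (faster: avoids the quadratic per-word rescans).

-- ===== PORT A =====
-- inner loop of A over word_list: state = (matching_counter, seen); returns the counter (0 on break)
def pvALoop (wordList lv : List Char) : List Char → Int → List Char → Int
  | [], counter, _ => counter
  | c :: rest, counter, seen =>
    if lv.contains c then
      if seen.contains c && (lv.count c == wordList.count c) then
        pvALoop wordList lv rest (counter + 2) seen
      else
        pvALoop wordList lv rest (counter + 1) (seen ++ [c])
    else 0

def find_shortest_word (plate : String) (vocabulary : List String) : String :=
  -- `ord(i) in range(97, 123)` is ported as the exact bounds 97 ≤ ord i ≤ 122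
  let wordList := (PySem.Str.lower plate).toList.foldl
      (fun acc c => if (decide (97 ≤ c.toNat) && decide (c.toNat ≤ 122)) = true then acc ++ [c] else acc) []
  if vocabulary = [] then ""
  else
    let mv := vocabulary.foldl
      (fun acc v =>
        let lv := (PySem.Str.lower v).toList
        acc ++ [(pvALoop wordList lv wordList 0 [], lv)]) ([] : List (Int × List Char))
    let maxc := match PySem.List.max? (mv.map (fun x => x.1)) (fun x => x) with
      | some m => m
      | none => 0   -- unreachable: mv is nonempty here
    if maxc = 0 then ""
    else
      let finals := mv.foldl (fun acc p => if p.1 == maxc then acc ++ [p.2] else acc) []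
      match PySem.List.min? finals (fun w => (w.length : Int)) with
      | some w => String.ofList w
      | none => ""   -- unreachable: finals is nonempty here

-- ===== PORT B =====
def pvBScore (letters : List Char) (cnt : PySem.Dict Char Int) (lw : List Char) : Int :=
  if cnt.keys.all (fun c => lw.contains c) then
    (letters.length : Int) +
      (cnt.items.map (fun p => if 1 < p.2 ∧ (lw.count p.1 : Int) = p.2 then p.2 - 1 else 0)).sum
  else 0

def find_shortest_word_alt (plate : String) (vocabulary : List String) : String :=
  let letters := (PySem.Str.lower plate).toList.filter (fun c => decide ('a' ≤ c) && decide (c ≤ 'z'))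
  let cnt := letters.foldl (fun d c => d.insert c (d.getD c 0 + 1)) PySem.Dict.empty
  let r := vocabulary.foldl
    (fun (acc : Int × Option (List Char)) w =>
      let lw := (PySem.Str.lower w).toList
      let score := pvBScore letters cnt lw
      if score > acc.1 ∨ (score = acc.1 ∧ acc.2.isSome ∧ lw.length < (acc.2.getD []).length)
      then (score, some lw) else acc)
    ((0 : Int), (none : Option (List Char)))
  match r.2 with
  | some b => String.ofList b
  | none => ""

-- ===== PRECONDITION & SPEC =====
def Spec_find_shortest_word (plate : String) (vocabulary : List String) (out : String) : Prop := out = find_shortest_word_alt plate vocabulary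
instance (plate : String) (vocabulary : List String) (out : String) : Decidable (Spec_find_shortest_word plate vocabulary out) := by unfold Spec_find_shortest_word; infer_instance

-- ===== CLAIM (what is proved, stated in full; the proofs are below) =====
def Claim_equal_find_shortest_word : Prop := ∀ (plate : String) (vocabulary : List String), Dom_find_shortest_word plate vocabulary → Spec_find_shortest_word plate vocabulary (find_shortest_word plate vocabulary)

-- ===== LEMMAS AND PROOFS =====

-- count of "repeat bonus" occurrences, mirroring A's seen-list walk
def pvRep (lv wordList : List Char) : List Char → List Char → Int
  | [], _ => 0
  | c :: rest, seen =>
    (if seen.contains c && (lv.count c == wordList.count c) then (1 : Int) else 0)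
      + pvRep lv wordList rest (seen ++ [c])

lemma pvRep_congr (lv wl : List Char) :
    ∀ (rest s₁ s₂ : List Char), (∀ x, x ∈ s₁ ↔ x ∈ s₂) →
      pvRep lv wl rest s₁ = pvRep lv wl rest s₂ := by
  intro rest
  induction rest with
  | nil => intro s₁ s₂ _; rfl
  | cons c t ih =>
    intro s₁ s₂ h
    have hc : s₁.contains c = s₂.contains c := by
      by_cases hm : c ∈ s₁
      · have : c ∈ s₂ := (h c).1 hm
        simp [List.contains_iff_mem, hm, this]
      · have : c ∉ s₂ := fun hx => hm ((h c).2 hx)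
        simp [List.contains_iff_mem, hm, this]
    have ht : ∀ x, x ∈ s₁ ++ [c] ↔ x ∈ s₂ ++ [c] := by
      intro x; simp [h x]
    simp only [pvRep, hc, ih (s₁ ++ [c]) (s₂ ++ [c]) ht]

lemma pvALoop_eq_rep (lv wl : List Char) :
    ∀ (rest : List Char) (k : Int) (seen : List Char),
      pvALoop wl lv rest k seen =
        if rest.all (fun c => lv.contains c)
        then k + rest.length + pvRep lv wl rest seen else 0 := by
  intro rest
  induction rest with
  | nil => intro k seen; simp [pvALoop, pvRep]
  | cons c t ih =>
    intro k seen
    by_cases hin : c ∈ lv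
    · by_cases hs : c ∈ seen ∧ lv.count c = wl.count c
      · have hrep : pvRep lv wl t (seen ++ [c]) = pvRep lv wl t seen := by
          apply pvRep_congr
          intro x
          constructor
          · intro hx
            rcases List.mem_append.mp hx with h | h
            · exact h
            · simp at h; subst h; exact hs.1
          · intro hx; exact List.mem_append.mpr (Or.inl hx)
        obtain ⟨hs1, hs2⟩ := hs
        by_cases ht : ∀ x ∈ t, x ∈ lv
        · simp [pvALoop, pvRep, ih, hin, hs1, hs2, ht, hrep]
          push_cast; ring
        · simp [pvALoop, pvRep, ih, hin, hs1, hs2, ht]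
      · by_cases ht : ∀ x ∈ t, x ∈ lv
        · simp [pvALoop, pvRep, ih, hin, ht, hs]
          push_cast; ring
        · simp [pvALoop, pvRep, ih, hin, ht, hs]
    · simp [pvALoop, hin]

lemma pvRep_append (lv wl : List Char) :
    ∀ (a b seen : List Char),
      pvRep lv wl (a ++ b) seen = pvRep lv wl a seen + pvRep lv wl b (seen ++ a) := by
  intro a
  induction a with
  | nil => intro b seen; simp [pvRep]
  | cons c t ih =>
    intro b seen
    simp only [List.cons_append, pvRep, ih b (seen ++ [c])]
    have h : seen ++ [c] ++ t = seen ++ (c :: t) := by simp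
    rw [h]; ring

lemma pvSumUpdate (c : Char) (f g : Char → Int) :
    ∀ (l : List Char), l.Nodup → c ∈ l → (∀ d ∈ l, d ≠ c → f d = g d) →
      (l.map f).sum = (l.map g).sum + (f c - g c) := by
  intro l
  induction l with
  | nil => intro _ h; simp at h
  | cons a t ih =>
    intro hnd hmem hfg
    rcases List.mem_cons.mp hmem with heq | hct
    · subst heq
      have ht : ∀ d ∈ t, f d = g d := fun d hd =>
        hfg d (List.mem_cons_of_mem _ hd) (fun hdc => absurd hd (by rw [hdc]; exact (List.nodup_cons.mp hnd).1))
      have hmap : t.map f = t.map g := List.map_congr_left ht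
      simp [hmap]; ring
    · have hac : a ≠ c := fun h => (List.nodup_cons.mp hnd).1 (h ▸ hct)
      have ha : f a = g a := hfg a List.mem_cons_self hac
      rw [List.map_cons, List.map_cons, List.sum_cons, List.sum_cons,
        ih (List.nodup_cons.mp hnd).2 hct (fun d hd hdc => hfg d (List.mem_cons_of_mem _ hd) hdc), ha]
      ring

lemma pvRep_closed (lv wl : List Char) :
    ∀ (rest : List Char),
      pvRep lv wl rest [] =
        ((PySem.List.dedup rest).map
          (fun c => if lv.count c = wl.count c then (rest.count c : Int) - 1 else 0)).sum := by
  intro rest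
  induction rest using List.reverseRecOn with
  | nil => simp [pvRep, PySem.List.dedup, PySem.Set.ofList, PySem.Set.empty]
  | append_singleton t c ih =>
    rw [pvRep_append lv wl t [c] []]
    simp only [List.nil_append, pvRep, add_zero]
    rw [PySem.List.dedup_eq_ofList, PySem.Set.ofList_append_singleton, PySem.Set.add]
    by_cases hc : c ∈ t
    · have hadd : ((if (PySem.Set.ofList t).contains c = true then PySem.Set.ofList t
          else PySem.Set.ofList t ++ [c]) : List Char) = PySem.Set.ofList t := by
        rw [if_pos]
        simp [List.contains_iff_mem, PySem.Set.mem_ofList, hc]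
      rw [hadd]
      have hupd :
          ((PySem.Set.ofList t).map
            (fun d => if lv.count d = wl.count d then ((t ++ [c]).count d : Int) - 1 else 0)).sum =
          ((PySem.Set.ofList t).map
            (fun d => if lv.count d = wl.count d then (t.count d : Int) - 1 else 0)).sum
            + ((if lv.count c = wl.count c then ((t ++ [c]).count c : Int) - 1 else 0)
               - (if lv.count c = wl.count c then (t.count c : Int) - 1 else 0)) := by
        apply pvSumUpdate c _ _ (PySem.Set.ofList t) (PySem.Set.nodup_ofList t)
          ((PySem.Set.mem_ofList t c).mpr hc)
        intro d _ hdc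
        have h0 : List.count d [c] = 0 := by
          rw [List.count_eq_zero]
          simpa using hdc
        rw [List.count_append, h0, Nat.add_zero]
      rw [hupd, ← PySem.List.dedup_eq_ofList, ← ih]
      have hcnt : (t ++ [c]).count c = t.count c + 1 := by
        rw [List.count_append]; simp
      rw [hcnt]
      by_cases hp : lv.count c = wl.count c
      · rw [if_pos (by simp [List.contains_iff_mem, hc, hp]), if_pos hp, if_pos hp]
        push_cast; ring
      · rw [if_neg (by simp [List.contains_iff_mem, hp]), if_neg hp, if_neg hp]
        ring
    · have hadd : ((if (PySem.Set.ofList t).contains c = true then PySem.Set.ofList t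
          else PySem.Set.ofList t ++ [c]) : List Char) = PySem.Set.ofList t ++ [c] := by
        rw [if_neg]
        simp [List.contains_iff_mem, PySem.Set.mem_ofList, hc]
      rw [hadd, List.map_append, List.sum_append]
      have hmap :
          ((PySem.Set.ofList t).map
            (fun d => if lv.count d = wl.count d then ((t ++ [c]).count d : Int) - 1 else 0)) =
          ((PySem.Set.ofList t).map
            (fun d => if lv.count d = wl.count d then (t.count d : Int) - 1 else 0)) := by
        apply List.map_congr_left
        intro d hd
        have hdc : d ≠ c := by
          intro h; exact hc (h ▸ (PySem.Set.mem_ofList t d).mp hd)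
        have h0 : List.count d [c] = 0 := by
          rw [List.count_eq_zero]
          simpa using hdc
        rw [List.count_append, h0, Nat.add_zero]
      rw [hmap, ← PySem.List.dedup_eq_ofList, ← ih]
      have hc0 : t.count c = 0 := List.count_eq_zero.mpr hc
      have hcc : (t ++ [c]).count c = 1 := by
        rw [List.count_append, hc0]; simp
      rw [if_neg (by simp [List.contains_iff_mem, hc])]
      simp [hcc]
      exact fun _ => hc0

lemma pvScore_eq (wl lv : List Char) :
    pvALoop wl lv wl 0 [] = pvBScore wl (PySem.Dict.counter wl) lv := by
  rw [pvALoop_eq_rep lv wl wl 0 [], pvRep_closed lv wl wl]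
  unfold pvBScore
  rw [PySem.Dict.keys_counter, PySem.Dict.items_counter]
  have hiff : (((PySem.Set.ofList wl).all fun c => lv.contains c) = true)
      ↔ ((wl.all fun c => lv.contains c) = true) := by
    simp [List.all_eq_true, PySem.Set.mem_ofList]
  by_cases h : (wl.all fun c => lv.contains c) = true
  · rw [if_pos h, if_pos (hiff.mpr h), List.map_map, zero_add, PySem.List.dedup_eq_ofList]
    congr 1
    congr 1
    apply List.map_congr_left
    intro d hd
    have hdw : d ∈ wl := (PySem.Set.mem_ofList wl d).mp hd
    have h1 : 0 < wl.count d := List.count_pos_iff.mpr hdw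
    by_cases hp : lv.count d = wl.count d
    · by_cases h2 : 1 < wl.count d
      · simp only [Function.comp, if_pos hp]
        rw [if_pos ⟨by exact_mod_cast h2, by exact_mod_cast hp⟩]
      · have hone : wl.count d = 1 := by omega
        simp [Function.comp, hp, hone]
    · simp only [Function.comp, if_neg hp]
      rw [if_neg]
      rintro ⟨-, hcast⟩
      exact hp (by exact_mod_cast hcast)
  · rw [if_neg h, if_neg (fun hx => h (hiff.mp hx))]

lemma pvBScore_nonneg (letters : List Char) (cnt : PySem.Dict Char Int) (lw : List Char) :
    0 ≤ pvBScore letters cnt lw := by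
  unfold pvBScore
  split
  · have hsum : 0 ≤ (cnt.items.map (fun p => if 1 < p.2 ∧ (lw.count p.1 : Int) = p.2 then p.2 - 1 else 0)).sum := by
      apply List.sum_nonneg
      intro x hx
      rcases List.mem_map.mp hx with ⟨p, _, rfl⟩
      split
      · omega
      · exact le_refl 0
    have : (0 : Int) ≤ (letters.length : Int) := by positivity
    omega
  · exact le_refl 0

-- the running-best step of B, on (score, lowered word) pairs
def pvStep (acc : Int × Option (List Char)) (p : Int × List Char) : Int × Option (List Char) :=
  if p.1 > acc.1 ∨ (p.1 = acc.1 ∧ acc.2.isSome ∧ p.2.length < (acc.2.getD []).length)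
  then (p.1, some p.2) else acc

def pvM (L : List (Int × List Char)) : Int := L.foldl (fun a p => max a p.1) 0

lemma pvMin?_append_of_some {α : Type} (xs : List α) (y : α) (key : α → Int) (m : α)
    (h : PySem.List.min? xs key = some m) :
    PySem.List.min? (xs ++ [y]) key = if key y < key m then some y else some m := by
  simp only [PySem.List.min?, List.foldl_append, List.foldl_cons, List.foldl_nil] at *
  rw [h]

lemma pvSel (L : List (Int × List Char)) (h : ∀ p ∈ L, 0 ≤ p.1) :
    L.foldl pvStep (0, none) =
      (pvM L,
        if pvM L = 0 then none
        else PySem.List.min? ((L.filter (fun p => p.1 == pvM L)).map Prod.snd)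
               (fun w => (w.length : Int))) := by
  induction L using List.reverseRecOn with
  | nil => simp [pvM]
  | append_singleton L p ih =>
    have hL : ∀ q ∈ L, 0 ≤ q.1 := fun q hq => h q (List.mem_append.mpr (Or.inl hq))
    have hp0 : 0 ≤ p.1 := h p (List.mem_append.mpr (Or.inr (by simp)))
    have hm0 : 0 ≤ pvM L := (PySem.List.le_foldl_max_int L Prod.fst 0).1
    have hub : ∀ q ∈ L, q.1 ≤ pvM L := (PySem.List.le_foldl_max_int L Prod.fst 0).2
    have hMapp : pvM (L ++ [p]) = max (pvM L) p.1 := by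
      simp [pvM, List.foldl_append]
    rw [List.foldl_append, List.foldl_cons, List.foldl_nil, ih hL, hMapp]
    rcases lt_trichotomy (pvM L) p.1 with hlt | heq | hgt
    · have hmax : max (pvM L) p.1 = p.1 := max_eq_right hlt.le
      have hne : ¬ p.1 = 0 := by omega
      rw [hmax, if_neg hne]
      have hfL : L.filter (fun q => q.1 == p.1) = [] := by
        rw [List.filter_eq_nil_iff]
        intro q hq
        simp only [beq_iff_eq]
        have := hub q hq; omega
      rw [List.filter_append, hfL, List.nil_append]
      have hfp : [p].filter (fun q => q.1 == p.1) = [p] := by simp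
      rw [hfp]
      simp [pvStep, hlt, PySem.List.min?]
    · rw [max_eq_left (le_of_eq heq.symm)]
      by_cases hz : pvM L = 0
      · have hpz : p.1 = 0 := by omega
        rw [if_pos hz]
        have hstep : pvStep ((pvM L), (none : Option (List Char))) p = (pvM L, none) := by
          unfold pvStep
          rw [if_neg]
          rintro (hgt' | ⟨-, hsome, -⟩)
          · omega
          · simp at hsome
        rw [hstep, if_pos hz]
      · rw [if_neg hz]
        have hmem : pvM L ∈ L.map Prod.fst := by
          have hfold : pvM L = (L.map Prod.fst).foldl max 0 := by
            simp [pvM, List.foldl_map]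
          rcases PySem.List.foldl_max_mem (L.map Prod.fst) 0 with h0 | hmem'
          · exact absurd (hfold.trans h0) hz
          · rw [hfold]; exact hmem'
        rcases List.mem_map.mp hmem with ⟨q, hqL, hq1⟩
        have hFne : (L.filter (fun r => r.1 == pvM L)).map Prod.snd ≠ [] := by
          simp only [ne_eq, List.map_eq_nil_iff, List.filter_eq_nil_iff]
          intro hall
          exact hall q hqL (by simp [hq1])
        obtain ⟨b, hb⟩ : ∃ b, PySem.List.min? ((L.filter (fun r => r.1 == pvM L)).map Prod.snd)
            (fun w => (w.length : Int)) = some b := by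
          cases hmin : PySem.List.min? ((L.filter (fun r => r.1 == pvM L)).map Prod.snd)
              (fun w => (w.length : Int)) with
          | none => exact absurd ((PySem.List.min?_eq_none_iff _ _).mp hmin) hFne
          | some b => exact ⟨b, rfl⟩
        rw [hb]
        have hfapp : (L ++ [p]).filter (fun r => r.1 == pvM L) =
            L.filter (fun r => r.1 == pvM L) ++ [p] := by
          rw [List.filter_append]
          simp [heq.symm]
        rw [hfapp, List.map_append]
        simp only [List.map_cons, List.map_nil]
        rw [pvMin?_append_of_some _ _ _ _ hb]
        by_cases hlen : p.2.length < b.length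
        · have hkey : ((p.2.length : Int)) < (b.length : Int) := by exact_mod_cast hlen
          rw [if_pos hkey]
          unfold pvStep
          rw [if_pos (Or.inr ⟨heq.symm, by simp, by simpa using hlen⟩), if_neg hz, heq]
        · have hkey : ¬ ((p.2.length : Int)) < (b.length : Int) := by
            intro hx; exact hlen (by exact_mod_cast hx)
          rw [if_neg hkey]
          have hcond : ¬ (p.1 > pvM L ∨ (p.1 = pvM L ∧ (some b).isSome = true ∧
              p.2.length < ((some b).getD []).length)) := by
            rintro (hgt' | ⟨-, -, hlt'⟩)
            · omega
            · exact hlen (by simpa using hlt')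
          unfold pvStep
          rw [if_neg hcond, if_neg hz]
    · rw [max_eq_left hgt.le]
      have hfapp : (L ++ [p]).filter (fun r => r.1 == pvM L) =
          L.filter (fun r => r.1 == pvM L) := by
        rw [List.filter_append]
        have : ¬ p.1 = pvM L := by omega
        simp [this]
      rw [hfapp]
      unfold pvStep
      rw [if_neg]
      rintro (hgt' | ⟨heq', -, -⟩)
      · omega
      · omega

lemma pvLetters_eq (s : List Char) :
    s.foldl (fun acc c => if (decide (97 ≤ c.toNat) && decide (c.toNat ≤ 122)) = true
                          then acc ++ [c] else acc) [] =
      s.filter (fun c => decide ('a' ≤ c) && decide (c ≤ 'z')) := by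
  rw [PySem.List.foldl_append_if (fun c => decide (97 ≤ c.toNat) && decide (c.toNat ≤ 122)) (fun c => c) s []]
  simp only [List.nil_append, List.map_id']
  apply List.filter_congr
  intro c _
  have h1 : ('a' ≤ c) ↔ (97 ≤ c.toNat) := by
    rw [Char.le_def, UInt32.le_iff_toNat_le]; rfl
  have h2 : (c ≤ 'z') ↔ (c.toNat ≤ 122) := by
    rw [Char.le_def, UInt32.le_iff_toNat_le]; rfl
  simp [h1, h2]

lemma pvMain (plate : String) (vocabulary : List String) :
    find_shortest_word plate vocabulary = find_shortest_word_alt plate vocabulary := by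
  unfold find_shortest_word find_shortest_word_alt
  simp only []
  rw [← pvLetters_eq ((PySem.Str.lower plate).toList)]
  generalize (PySem.Str.lower plate).toList.foldl
      (fun acc c => if (decide (97 ≤ c.toNat) && decide (c.toNat ≤ 122)) = true
                    then acc ++ [c] else acc) [] = wl
  rw [PySem.Dict.foldl_insert_getD_add_one_eq_counter]
  have hscore : ∀ v : String,
      pvBScore wl (PySem.Dict.counter wl) ((PySem.Str.lower v).toList)
        = pvALoop wl ((PySem.Str.lower v).toList) wl 0 [] :=
    fun v => (pvScore_eq wl ((PySem.Str.lower v).toList)).symm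
  have hBfold : vocabulary.foldl
      (fun (acc : Int × Option (List Char)) w =>
        let lw := (PySem.Str.lower w).toList
        let score := pvBScore wl (PySem.Dict.counter wl) lw
        if score > acc.1 ∨ (score = acc.1 ∧ acc.2.isSome ∧ lw.length < (acc.2.getD []).length)
        then (score, some lw) else acc)
      ((0 : Int), (none : Option (List Char)))
      = (vocabulary.map (fun v =>
          (pvALoop wl ((PySem.Str.lower v).toList) wl 0 [], (PySem.Str.lower v).toList))).foldl
          pvStep (0, none) := by
    rw [List.foldl_map]
    congr 1
    funext acc w
    simp only [pvStep, hscore w]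
  have hmv : ∀ (acc : List (Int × List Char)), vocabulary.foldl
      (fun acc v =>
        let lv := (PySem.Str.lower v).toList
        acc ++ [(pvALoop wl lv wl 0 [], lv)]) acc
      = acc ++ vocabulary.map (fun v =>
          (pvALoop wl ((PySem.Str.lower v).toList) wl 0 [], (PySem.Str.lower v).toList)) :=
    fun acc => PySem.List.foldl_append_singleton_eq_map _ vocabulary acc
  rw [hBfold]
  cases vocabulary with
  | nil => simp
  | cons v vs =>
    rw [if_neg (by simp)]
    rw [hmv]
    simp only [List.nil_append]
    set L := ((v :: vs).map (fun v =>
      (pvALoop wl ((PySem.Str.lower v).toList) wl 0 [], (PySem.Str.lower v).toList))) with hLdef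
    have hpos : ∀ p ∈ L, 0 ≤ p.1 := by
      intro p hp
      rcases List.mem_map.mp hp with ⟨u, -, rfl⟩
      rw [← hscore u]
      exact pvBScore_nonneg _ _ _
    rw [pvSel L hpos]
    have hMfold : pvM L = List.foldl max
        (pvALoop wl ((PySem.Str.lower v).toList) wl 0 [])
        ((vs.map (fun u =>
          (pvALoop wl ((PySem.Str.lower u).toList) wl 0 [], (PySem.Str.lower u).toList))).map
            (fun x => x.1)) := by
      have h0 : (0 : Int) ≤ pvALoop wl ((PySem.Str.lower v).toList) wl 0 [] := by
        rw [← hscore v]; exact pvBScore_nonneg _ _ _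
      simp only [pvM, hLdef, List.map_cons, List.foldl_map, List.foldl_cons]
      rw [max_eq_right h0, ← List.foldl_map]
    have hmax : PySem.List.max? (L.map (fun x => x.1)) (fun x => x) = some (pvM L) := by
      conv_lhs => rw [hLdef]; simp only [List.map_cons]
      rw [PySem.List.max?_id_cons]
      exact congrArg some hMfold.symm
  -- finals loop = map snd of filter
    have hfin : ∀ m : Int, L.foldl (fun acc p => if p.1 == m then acc ++ [p.2] else acc) []
        = (L.filter (fun p => p.1 == m)).map Prod.snd := by
      intro m
      have := PySem.List.foldl_append_if (fun p : Int × List Char => p.1 == m) Prod.snd L []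
      simpa using this
    simp only [hmax]
    rw [hfin]
    by_cases hz : pvM L = 0
    · simp [hz]
    · simp [hz]

-- ===== VERDICT (by name: the statement is the Claim_ definition above) =====
theorem find_shortest_word_spec : Claim_equal_find_shortest_word := by
  intro plate vocabulary _
  unfold Spec_find_shortest_word
  exact pvMain plate vocabulary
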